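-- pv_equiv track=rewrite | github.com/pypi-data/pypi-mirror-398 | packages/damp11113/damp11113-2025.2.22.post1.tar.gz/damp11113-2025.2.22.post1/src/damp11113/utils.py | dotPlot
-- ===== SOURCE A (Python) =====
-- def dotPlot(data, dot=". ", showlable=True):
--     max_value = max(data)
--     dot_plot = ''
--
--     for i in range(max_value, 0, -1):
--         row = ''
--         for value in data:
--             if value >= i:
--                 row += dot  # Use a dot to represent the value
--             else:
--                 row += ' ' * len(dot)  # Use empty space if the value is lower
--         dot_plot += row + '\n'
--
--     if showlable:
--         x_axis_labels = ' '.join(str(i) for i in range(1, len(data) + 1))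
--         dot_plot += x_axis_labels + '\n'
--
--     return dot_plot
-- ===== SOURCE B (Python) =====
-- def dotPlot(data, dot=". ", showlable=True):
--     m = max(data)
--     blank = ' ' * len(dot)
--     rows = [[] for _ in range(max(m, 0))]  # one buffer of cell strings per output row
--     for value in data:
--         t = min(max(value, 0), m)  # number of bottom rows of this column that get a dot
--         for k in range(m - t):
--             rows[k].append(blank)
--         for k in range(m - t, m):
--             rows[k].append(dot)
--     out = ''.join(''.join(r) + '\n' for r in rows)
--     if showlable:
--         out += ' '.join(str(i) for i in range(1, len(data) + 1)) + '\n'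
--     return out
-- ===== Notes on version B (the rewrite author's own statement) =====
-- stated objective: alternative
-- what changed: B builds the plot column-major: one buffer per output row, and each data value places its clamped count of dots into the bottom rows of its column (blanks above) by range, instead of A's row-by-row scan testing value >= i for every cell.
-- outside the precondition, e.g. on dotPlot([], '. ', True): A raises ValueError, B raises ValueError
import Mathlib
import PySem

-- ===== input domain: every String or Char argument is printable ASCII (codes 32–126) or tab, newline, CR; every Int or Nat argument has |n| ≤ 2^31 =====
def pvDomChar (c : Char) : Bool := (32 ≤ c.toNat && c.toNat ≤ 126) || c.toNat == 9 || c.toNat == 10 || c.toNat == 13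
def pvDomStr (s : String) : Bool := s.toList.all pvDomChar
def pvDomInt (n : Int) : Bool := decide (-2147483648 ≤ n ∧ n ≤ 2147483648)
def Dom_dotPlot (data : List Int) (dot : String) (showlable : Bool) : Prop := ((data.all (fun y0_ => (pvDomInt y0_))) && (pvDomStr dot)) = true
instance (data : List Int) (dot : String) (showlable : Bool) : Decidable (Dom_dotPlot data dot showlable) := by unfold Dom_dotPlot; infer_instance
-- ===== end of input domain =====

-- B is an alternative, column-major decomposition of A (each value places its clamped
-- count of dots into the bottom rows of its column); equal output, same cost.
-- Strings are carried as List Char (PySem.Chars) inside both ports and wrapped with String.mk.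

-- ===== PORT A =====
-- inner loop of A: row = ''; for value in data: row += dot if value >= i else ' '*len(dot)
def dotPlotRowA (data : List Int) (dotc : List Char) (i : Int) : List Char :=
  data.foldl (fun row v => row ++ (if i ≤ v then dotc else List.replicate dotc.length ' ')) []

def dotPlot (data : List Int) (dot : String) (showlable : Bool) : String :=
  let dotc := dot.toList
  let maxValue := ((PySem.List.max? data (fun y => y)).getD 0)   -- max(data); Pre_ excludes data = [] (ValueError)
  let body := (PySem.List.pyRange maxValue 0 (-1)).foldl
      (fun acc i => acc ++ (dotPlotRowA data dotc i ++ ['\n'])) []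
  let out := if showlable then
      body ++ PySem.Chars.join [' '] ((PySem.List.pyRange 1 ((data.length : Int) + 1) 1).map PySem.Int.toChars) ++ ['\n']
    else body
  String.mk out

-- ===== PORT B =====
-- place one column: blanks onto the top m-t rows, dots onto the bottom t rows
def dotPlotCol (rows : List (List Char)) (j : Nat) (dotc blank : List Char) : List (List Char) :=
  (rows.take j).map (fun r => r ++ blank) ++ (rows.drop j).map (fun r => r ++ dotc)

def dotPlot_alt (data : List Int) (dot : String) (showlable : Bool) : String :=
  let dotc := dot.toList
  let m := ((PySem.List.max? data (fun y => y)).getD 0)          -- max(data); Pre_ excludes data = [] (ValueError)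
  let mN := m.toNat                                              -- max(m, 0) row buffers
  let blank := List.replicate dotc.length ' '
  let rows := data.foldl
      (fun rows v => dotPlotCol rows (mN - (min (max v 0) m).toNat) dotc blank)
      (List.replicate mN [])
  let body := rows.foldl (fun acc r => acc ++ (r ++ ['\n'])) []
  let out := if showlable then
      body ++ PySem.Chars.join [' '] ((PySem.List.pyRange 1 ((data.length : Int) + 1) 1).map PySem.Int.toChars) ++ ['\n']
    else body
  String.mk out

-- ===== PRECONDITION & SPEC =====
-- Pre_ excludes exactly data = [], where Python's max(data) raises ValueError.
def Pre_dotPlot (data : List Int) (dot : String) (showlable : Bool) : Prop := data ≠ []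
instance (data : List Int) (dot : String) (showlable : Bool) : Decidable (Pre_dotPlot data dot showlable) := by unfold Pre_dotPlot; infer_instance
def pvWitness_dotPlot : List Int × String × Bool := ([1, 3, 2], ". ", true)

def Spec_dotPlot (data : List Int) (dot : String) (showlable : Bool) (out : String) : Prop := out = dotPlot_alt data dot showlable
instance (data : List Int) (dot : String) (showlable : Bool) (out : String) : Decidable (Spec_dotPlot data dot showlable out) := by unfold Spec_dotPlot; infer_instance

-- ===== CLAIM (what is proved, stated in full; the proofs are below) =====
def Claim_equal_dotPlot : Prop := ∀ (data : List Int) (dot : String) (showlable : Bool), Dom_dotPlot data dot showlable → Pre_dotPlot data dot showlable → Spec_dotPlot data dot showlable (dotPlot data dot showlable)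

-- ===== LEMMAS AND PROOFS =====

-- length is preserved by placing one column
lemma dotPlotCol_length (rows : List (List Char)) (j : Nat) (dotc blank : List Char)
    (hj : j ≤ rows.length) : (dotPlotCol rows j dotc blank).length = rows.length := by
  simp [dotPlotCol]; omega

-- cell view of one column placement
lemma dotPlotCol_getElem (rows : List (List Char)) (j : Nat) (dotc blank : List Char)
    (hj : j ≤ rows.length) (k : Nat) (hk : k < rows.length) :
    (dotPlotCol rows j dotc blank)[k]'(by rw [dotPlotCol_length _ _ _ _ hj]; exact hk) =
      rows[k] ++ (if j ≤ k then dotc else blank) := by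
  unfold dotPlotCol
  by_cases h : k < j
  · rw [List.getElem_append_left (by simp; omega)]
    simp [Nat.not_le.mpr h]
  · rw [List.getElem_append_right (by simp; omega)]
    simp [Nat.not_lt.mp h]
    congr 1
    omega

-- placing one column on rows given as a map over row indices
lemma dotPlotCol_map_range (mN : Nat) (F : Nat → List Char) (j : Nat) (hj : j ≤ mN)
    (dotc blank : List Char) :
    dotPlotCol ((List.range mN).map F) j dotc blank =
      (List.range mN).map (fun k => F k ++ (if j ≤ k then dotc else blank)) := by
  apply List.ext_getElem
  · rw [dotPlotCol_length _ _ _ _ (by simpa using hj)]; simp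
  · intro k h1 h2
    rw [dotPlotCol_getElem _ _ _ _ (by simpa using hj) k (by simpa using h2)]
    simp

-- B's fold over data, row by row
lemma dotPlot_fold_map (mN : Nat) (m : Int) (dotc blank : List Char) (data : List Int) :
    ∀ F : Nat → List Char,
    data.foldl (fun rows v => dotPlotCol rows (mN - (min (max v 0) m).toNat) dotc blank)
        ((List.range mN).map F) =
      (List.range mN).map (fun k =>
        F k ++ data.flatMap (fun v => if mN - (min (max v 0) m).toNat ≤ k then dotc else blank)) := by
  induction data with
  | nil => intro F; simp
  | cons v d ih =>
    intro F
    rw [List.foldl_cons, dotPlotCol_map_range mN F _ (Nat.sub_le _ _) dotc blank, ih]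
    apply List.map_congr_left
    intro k _
    simp [List.append_assoc]

-- the per-cell conditions of A and B agree
lemma dotPlot_cond_eq (v m : Int) (k : Nat) (hk : k < m.toNat) :
    (if m.toNat - (min (max v 0) m).toNat ≤ k then True else False) =
      (if m - (k : Int) ≤ v then True else False) := by
  have : (m.toNat - (min (max v 0) m).toNat ≤ k) ↔ (m - (k : Int) ≤ v) := by
    simp only [min_def, max_def]
    split_ifs <;> omega
  simp [this]

-- one row of A equals the corresponding row of B's buffer
lemma dotPlot_row_eq (data : List Int) (dotc blank : List Char) (m : Int) (k : Nat)
    (hk : k < m.toNat) :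
    data.flatMap (fun v => if m - (k : Int) ≤ v then dotc else blank) =
      data.flatMap (fun v => if m.toNat - (min (max v 0) m).toNat ≤ k then dotc else blank) := by
  rw [List.flatMap_eq_foldl, List.flatMap_eq_foldl]
  congr 1
  funext acc v
  have h := dotPlot_cond_eq v m k hk
  by_cases hc : m - (k : Int) ≤ v
  · have : m.toNat - (min (max v 0) m).toNat ≤ k := by
      by_contra hne; simp [hc, hne] at h
    simp [hc, this]
  · have : ¬ (m.toNat - (min (max v 0) m).toNat ≤ k) := by
      intro hyes; simp [hc, hyes] at h
    simp [hc, this]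

-- the bodies (everything before the label line) agree
lemma dotPlot_body_eq (data : List Int) (dotc : List Char) (m : Int) :
    (PySem.List.pyRange m 0 (-1)).foldl
        (fun acc i => acc ++ (dotPlotRowA data dotc i ++ ['\n'])) [] =
      (data.foldl
          (fun rows v =>
            dotPlotCol rows (m.toNat - (min (max v 0) m).toNat) dotc
              (List.replicate dotc.length ' '))
          (List.replicate m.toNat [])).foldl (fun acc r => acc ++ (r ++ ['\n'])) [] := by
  have hrepl : (List.replicate m.toNat ([] : List Char)) =
      (List.range m.toNat).map (fun _ => ([] : List Char)) := by
    simp [List.map_const']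
  rw [hrepl, dotPlot_fold_map m.toNat m dotc (List.replicate dotc.length ' ') data]
  rw [PySem.List.foldl_append_eq_flatMap, PySem.List.foldl_append_eq_flatMap]
  rw [PySem.List.pyRange_neg_one]
  simp only [Int.sub_zero, List.flatMap_map, List.nil_append]
  apply List.flatMap_congr
  intro k hk
  have hkm : k < m.toNat := List.mem_range.mp hk
  show dotPlotRowA data dotc (m - (k : Int)) ++ ['\n'] = _
  rw [dotPlotRowA, PySem.List.foldl_append_eq_flatMap, List.nil_append,
    dotPlot_row_eq data dotc (List.replicate dotc.length ' ') m k hkm]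

-- ===== VERDICT =====

theorem dotPlot_spec : Claim_equal_dotPlot := by
  intro data dot showlable hdom hpre
  show dotPlot data dot showlable = dotPlot_alt data dot showlable
  simp only [dotPlot, dotPlot_alt]
  rw [dotPlot_body_eq data dot.toList]
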